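-- pv_equiv track=rewrite | github.com/ajeseung/Coding_test_practice | 프로그래머스/2/389479. 서버 증설 횟수/서버 증설 횟수.py | solution
-- ===== SOURCE A (Python) =====
-- def solution(players, m, k):
--     n = len(players)  # 24시간 기준
--     running_servers = [0] * n  # 각 시간대에 새롭게 추가된 서버 수
--     total_additions = 0  # 총 서버 증설 횟수
--
--     active_servers = 0  # 현재 운영 중인 서버 수
--
--     for hour in range(n):
--         # k시간 전에 추가된 서버가 만료되면 제거
--         if hour >= k:
--             active_servers -= running_servers[hour - k]
--
--         # 현재 필요한 서버 수 계산
--         required_servers = players[hour] // m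
--
--         # 부족한 서버 수 계산
--         if required_servers > active_servers:
--             new_servers = required_servers - active_servers
--             total_additions += new_servers
--             running_servers[hour] = new_servers  # 현재 시간에 추가된 서버 기록
--             active_servers += new_servers  # 운영 중인 서버 수 업데이트
--
--     return total_additions
-- ===== SOURCE B (Python) =====
-- def solution(players, m, k):
--     # Staged formulation: build the per-hour additions list by appending, recomputing
--     # the still-active server count from a window slice each hour; total = sum at the end.
--     added = []
--     for hour, p in enumerate(players):
--         active = sum(added[max(0, hour - k + 1):])
--         added.append(max(p // m - active, 0))
--     return sum(added)
-- ===== Notes on version B (the rewrite author's own statement) =====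
-- stated objective: alternative
-- what changed: B drops A's preallocated array, running active-server counter and expiry subtraction: it appends each hour's additions to a growing list, recomputes the active count from a window slice of that list every hour, and returns the list's sum.
-- intended difference: When k = 0 and at least two hours have players[h] // m > 0, A returns the running maximum of the requirements (its expiry step reads the current hour's slot before writing it, so servers never expire), while B applies the stated zero-hour lifetime and returns the sum of the requirements, the intended count for a lifetime-k server model. — e.g. on solution([2, 2], 1, 0): A returns 2, B returns 4
import Mathlib
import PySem

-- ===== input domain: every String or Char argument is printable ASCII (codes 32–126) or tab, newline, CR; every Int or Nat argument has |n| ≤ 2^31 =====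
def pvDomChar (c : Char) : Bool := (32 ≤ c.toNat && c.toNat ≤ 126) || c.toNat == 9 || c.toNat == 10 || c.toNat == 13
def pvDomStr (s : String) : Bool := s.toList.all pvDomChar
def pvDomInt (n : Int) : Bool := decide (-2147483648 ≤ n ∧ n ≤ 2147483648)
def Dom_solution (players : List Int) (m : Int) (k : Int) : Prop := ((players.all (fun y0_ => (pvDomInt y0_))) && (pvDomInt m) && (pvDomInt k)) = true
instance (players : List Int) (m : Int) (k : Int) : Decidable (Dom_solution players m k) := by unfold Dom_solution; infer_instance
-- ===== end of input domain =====

-- B rebuilds the per-hour additions list by appending, recomputing the active-server count from a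
-- window slice each hour and summing the list at the end (alternative decomposition; it trades
-- A's O(n) incremental counter for an O(n*k) re-summation). Where A's k = 0 expiry reads the
-- current hour's slot before it is written (so servers never expire), B applies the stated
-- lifetime and they differ: see D_solution.


-- ===== PORT A =====
-- loop body of A's `for hour in range(n)` (state: running_servers, total_additions, active_servers)
def stepA (players : List Int) (m : Int) (k : Int) (st : List Int × Int × Int) (hour : Nat) : List Int × Int × Int :=
  let rs := st.1
  let total := st.2.1
  let active := if k ≤ (hour : Int) then st.2.2 - PySem.List.pyGetD rs ((hour : Int) - k) 0 else st.2.2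
  let required := PySem.Int.floordiv (PySem.List.pyGetD players (hour : Int) 0) m
  if active < required then
    (PySem.List.pySetD rs (hour : Int) (required - active), total + (required - active), active + (required - active))
  else (rs, total, active)

def solution (players : List Int) (m : Int) (k : Int) : Int :=
  ((List.range players.length).foldl (stepA players m k) (List.replicate players.length 0, 0, 0)).2.1

-- ===== PORT B =====
-- loop body of B's `for hour, p in enumerate(players)` (state: the `added` list)
def stepB (m : Int) (k : Int) (added : List Int) (hp : Int × Int) : List Int :=
  let active := (PySem.List.slice added (some (max 0 (hp.1 - k + 1))) none).sum
  added ++ [max (PySem.Int.floordiv hp.2 m - active) 0]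

def solution_alt (players : List Int) (m : Int) (k : Int) : Int :=
  ((PySem.List.enumerate players 0).foldl (stepB m k) []).sum

-- ===== PRECONDITION & SPEC =====
-- Pre_ excludes only inputs on which A raises: with a nonempty list, m = 0 (ZeroDivisionError)
-- and negative k (IndexError on running_servers[hour - k]); on the empty list A always returns.
def Pre_solution (players : List Int) (m : Int) (k : Int) : Prop :=
  players = [] ∨ (m ≠ 0 ∧ 0 ≤ k)
instance (players : List Int) (m : Int) (k : Int) : Decidable (Pre_solution players m k) := by unfold Pre_solution; infer_instance
def pvWitness_solution : List Int × Int × Int := ([10, 3, 9, 1], 2, 2)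

-- When k = 0 and at least two hours need a server (players[h] // m > 0), A never expires any
-- server (it reads the current hour's expiry slot before writing it) and returns the running
-- maximum of the requirements, while B applies the stated zero-hour lifetime and returns their
-- sum — the intended count for a lifetime-k server model.
def D_solution (players : List Int) (m : Int) (k : Int) : Prop :=
  k = 0 ∧ 2 ≤ List.countP (fun p => decide (0 < PySem.Int.floordiv p m)) players
instance (players : List Int) (m : Int) (k : Int) : Decidable (D_solution players m k) := by unfold D_solution; infer_instance

def Spec_solution (players : List Int) (m : Int) (k : Int) (out : Int) : Prop :=
  ¬ D_solution players m k → out = solution_alt players m k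
instance (players : List Int) (m : Int) (k : Int) (out : Int) : Decidable (Spec_solution players m k out) := by unfold Spec_solution; infer_instance

def pvDiffWitness_solution : List Int × Int × Int := ([2, 2], 1, 0)
def pvDiffWitnessOut_solution : Int × Int := (2, 4)

-- ===== CLAIM (what is proved, stated in full; the proofs are below) =====
def Claim_unchanged_solution : Prop := ∀ (players : List Int) (m : Int) (k : Int), Dom_solution players m k → Pre_solution players m k → Spec_solution players m k (solution players m k)
def Claim_changed_solution : Prop := Dom_solution (pvDiffWitness_solution.1) (pvDiffWitness_solution.2.1) (pvDiffWitness_solution.2.2) ∧ Pre_solution (pvDiffWitness_solution.1) (pvDiffWitness_solution.2.1) (pvDiffWitness_solution.2.2) ∧ D_solution (pvDiffWitness_solution.1) (pvDiffWitness_solution.2.1) (pvDiffWitness_solution.2.2) ∧ solution (pvDiffWitness_solution.1) (pvDiffWitness_solution.2.1) (pvDiffWitness_solution.2.2) = pvDiffWitnessOut_solution.1 ∧ solution_alt (pvDiffWitness_solution.1) (pvDiffWitness_solution.2.1) (pvDiffWitness_solution.2.2) = pvDiffWitnessOut_solution.2 ∧ pvDiffWitnessOut_solution.1 ≠ pvD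iffWitnessOut_solution.2
def Claim_exact_solution : Prop := ∀ (players : List Int) (m : Int) (k : Int), Dom_solution players m k → Pre_solution players m k → D_solution players m k → solution players m k ≠ solution_alt players m k

-- ===== LEMMAS AND PROOFS =====

-- abbreviations for the two loop states after h iterations
def runA (players : List Int) (m k : Int) (h : Nat) : List Int × Int × Int :=
  (List.range h).foldl (stepA players m k) (List.replicate players.length 0, 0, 0)

def runB (players : List Int) (m k : Int) (h : Nat) : List Int :=
  ((PySem.List.enumerate players 0).take h).foldl (stepB m k) []

lemma runA_succ (players : List Int) (m k : Int) (h : Nat) :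
    runA players m k (h + 1) = stepA players m k (runA players m k h) h := by
  simp [runA, List.range_succ]

lemma runB_succ (players : List Int) (m k : Int) (h : Nat) (hh : h < players.length) :
    runB players m k (h + 1) = stepB m k (runB players m k h) ((h : Int), players[h]) := by
  have : (PySem.List.enumerate players 0).take (h + 1)
      = (PySem.List.enumerate players 0).take h ++ [((h : Int), players[h])] := by
    rw [List.take_add_one]
    have hlen : h < (PySem.List.enumerate players 0).length := by
      rw [PySem.List.length_enumerate]; exact hh
    rw [List.getElem?_eq_getElem hlen]
    simp [PySem.List.getElem_enumerate]
  simp [runB, this]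

-- the invariant for k ≥ 1: B's list is the written prefix of A's array, A's total is its sum,
-- A's active counter is the sum of the not-yet-expired suffix
lemma invPos (players : List Int) (m k : Int) (hk : 1 ≤ k) :
    ∀ h, h ≤ players.length →
      (runB players m k h).length = h
      ∧ (runA players m k h).1 = runB players m k h ++ List.replicate (players.length - h) 0
      ∧ (runA players m k h).2.1 = (runB players m k h).sum
      ∧ (runA players m k h).2.2 = ((runB players m k h).drop (h - k.toNat)).sum := by
  intro h
  induction h with
  | zero =>
    intro _
    exact ⟨rfl, by simp [runA, runB], rfl, by simp [runA, runB]⟩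
  | succ h ih =>
    intro hle
    have hh : h < players.length := by omega
    obtain ⟨h1, h2, h3, h4⟩ := ih (by omega)
    set kn := k.toNat with hkn
    have hknk : (kn : Int) = k := Int.toNat_of_nonneg (by omega)
    have hkn1 : 1 ≤ kn := by omega
    rw [runA_succ, runB_succ players m k h hh]
    set sB := runB players m k h with hsB
    -- the active count both sides use at hour h
    have hact : (if k ≤ (h : Int) then (runA players m k h).2.2 - PySem.List.pyGetD (runA players m k h).1 ((h : Int) - k) 0 else (runA players m k h).2.2)
        = (sB.drop (h + 1 - kn)).sum := by
      by_cases hkh : k ≤ (h : Int)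
      · have hknh : kn ≤ h := by omega
        have hidx : (h : Int) - k = ((h - kn : Nat) : Int) := by omega
        rw [if_pos hkh, hidx, PySem.List.pyGetD_natCast, h2, h4]
        have hlt : h - kn < sB.length := by omega
        have hgetD : (sB ++ List.replicate (players.length - h) 0).getD (h - kn) 0 = sB[h - kn] := by
          rw [List.getD, List.getElem?_append_left hlt]
          simp [hlt]
        rw [hgetD, List.drop_eq_getElem_cons hlt, List.sum_cons]
        have : h + 1 - kn = h - kn + 1 := by omega
        rw [this]
        ring
      · have hknh : h < kn := by omega
        rw [if_neg hkh, h4]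
        have e1 : h - kn = 0 := by omega
        have e2 : h + 1 - kn = 0 := by omega
        rw [e1, e2]
    -- B reads the same count from its slice
    have hslice : (PySem.List.slice sB (some (max 0 ((h : Int) - k + 1))) none).sum
        = (sB.drop (h + 1 - kn)).sum := by
      have : max 0 ((h : Int) - k + 1) = ((h + 1 - kn : Nat) : Int) := by omega
      rw [this, PySem.List.slice_from_natCast]
    have hreq : PySem.List.pyGetD players ((h : Int)) 0 = players[h] := by
      rw [PySem.List.pyGetD_natCast, List.getD, List.getElem?_eq_getElem hh]
      rfl
    unfold stepA stepB
    simp only [hact, hslice, hreq]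
    set act := (sB.drop (h + 1 - kn)).sum with hactd
    set req := PySem.Int.floordiv players[h] m with hreqd
    have hrepl : List.replicate (players.length - h) (0 : Int) = 0 :: List.replicate (players.length - h - 1) 0 := by
      rw [← List.replicate_succ]
      congr 1
      omega
    have hdropapp : ∀ v : Int, ((sB ++ [v]).drop (h + 1 - kn)) = sB.drop (h + 1 - kn) ++ [v] :=
      fun v => List.drop_append_of_le_length (by omega)
    by_cases hc : act < req
    · rw [if_pos hc]
      have hv : max (req - act) 0 = req - act := by omega
      refine ⟨by rw [List.length_append, h1]; rfl, ?_, ?_, ?_⟩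
      · -- array after the write
        rw [h2, hrepl, PySem.List.pySetD_natCast]
        have hset : (sB ++ 0 :: List.replicate (players.length - h - 1) 0).set h (req - act)
            = sB ++ (req - act) :: List.replicate (players.length - h - 1) 0 := by
          rw [show h = sB.length by omega]
          simp
        rw [hset, hv, show players.length - (h + 1) = players.length - h - 1 by omega]
        simp
      · rw [h3, hv, List.sum_append, List.sum_cons, List.sum_nil]; ring
      · rw [hv, hdropapp, List.sum_append, List.sum_cons, List.sum_nil]; ring
    · rw [if_neg hc]
      have hv : max (req - act) 0 = 0 := by omega
      refine ⟨by rw [List.length_append, h1]; rfl, ?_, ?_, ?_⟩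
      · rw [h2, hrepl, hv, show players.length - (h + 1) = players.length - h - 1 by omega]
        simp
      · rw [h3, hv, List.sum_append, List.sum_cons, List.sum_nil]; ring
      · rw [hv, hdropapp, List.sum_append, List.sum_cons, List.sum_nil]; ring

lemma eq_of_pos (players : List Int) (m k : Int) (hk : 1 ≤ k) :
    solution players m k = solution_alt players m k := by
  obtain ⟨h1, _, h3, _⟩ := invPos players m k hk players.length (le_refl _)
  have : (PySem.List.enumerate players 0).take players.length = PySem.List.enumerate players 0 := by
    apply List.take_of_length_le
    rw [PySem.List.length_enumerate]
  unfold solution solution_alt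
  rw [← this]
  exact h3

-- ---- the k = 0 characterisations ----

-- A with k = 0 subtracts running_servers[hour] before writing it (always 0), so its active
-- counter and total coincide and run the prefix maximum of the requirements
lemma invA_zero (players : List Int) (m : Int) :
    ∀ h, h ≤ players.length →
      (runA players m 0 h).1.length = players.length
      ∧ (∀ t, h ≤ t → (runA players m 0 h).1.getD t 0 = 0)
      ∧ (runA players m 0 h).2.1
          = ((players.take h).map (fun p => PySem.Int.floordiv p m)).foldl max 0
      ∧ (runA players m 0 h).2.2
          = ((players.take h).map (fun p => PySem.Int.floordiv p m)).foldl max 0 := by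
  intro h
  induction h with
  | zero =>
    intro _
    exact ⟨by simp [runA], fun t _ => by simp [runA, List.getD], rfl, rfl⟩
  | succ h ih =>
    intro hle
    have hh : h < players.length := by omega
    obtain ⟨h1, h2, h3, h4⟩ := ih (by omega)
    rw [runA_succ]
    have hreq : PySem.List.pyGetD players ((h : Int)) 0 = players[h] := by
      rw [PySem.List.pyGetD_natCast, List.getD, List.getElem?_eq_getElem hh]
      rfl
    have hzero : PySem.List.pyGetD (runA players m 0 h).1 ((h : Int)) 0 = 0 := by
      rw [PySem.List.pyGetD_natCast]
      exact h2 h (le_refl h)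
    have htake : (players.take (h + 1)).map (fun p => PySem.Int.floordiv p m)
        = (players.take h).map (fun p => PySem.Int.floordiv p m) ++ [PySem.Int.floordiv players[h] m] := by
      rw [List.take_add_one, List.getElem?_eq_getElem hh]
      simp only [Option.toList_some, List.map_append, List.map_cons, List.map_nil]
    have hfold : ((players.take (h + 1)).map (fun p => PySem.Int.floordiv p m)).foldl max 0
        = max (((players.take h).map (fun p => PySem.Int.floordiv p m)).foldl max 0) (PySem.Int.floordiv players[h] m) := by
      rw [htake, List.foldl_append]
      rfl
    unfold stepA
    simp only [hreq, hzero, if_pos (show (0 : Int) ≤ (h : Int) by positivity), sub_zero]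
    set req := PySem.Int.floordiv players[h] m with hreqd
    by_cases hc : (runA players m 0 h).2.2 < req
    · rw [if_pos hc]
      refine ⟨?_, ?_, ?_, ?_⟩
      · rw [PySem.List.pySetD_natCast, List.length_set]; exact h1
      · intro t ht
        rw [PySem.List.pySetD_natCast, List.getD, List.getElem?_set_ne (by omega), ← List.getD]
        exact h2 t (by omega)
      · simp only [hfold]
        omega
      · simp only [hfold]
        omega
    · rw [if_neg hc]
      refine ⟨h1, fun t ht => h2 t (by omega), ?_, ?_⟩
      · simp only [hfold]
        omega
      · simp only [hfold]
        omega

-- B with k = 0 slices an empty window every hour, so it records max(p // m, 0) for every hour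
lemma invB_zero (players : List Int) (m : Int) :
    ∀ h, h ≤ players.length →
      runB players m 0 h = (players.take h).map (fun p => max (PySem.Int.floordiv p m) 0) := by
  intro h
  induction h with
  | zero => intro _; rfl
  | succ h ih =>
    intro hle
    have hh : h < players.length := by omega
    rw [runB_succ players m 0 h hh, ih (by omega)]
    unfold stepB
    have hlen : ((players.take h).map (fun p => max (PySem.Int.floordiv p m) 0)).length = h := by
      simp [List.length_take, Nat.min_eq_left (le_of_lt hh)]
    have hb : max 0 ((h : Int) - 0 + 1) = ((h + 1 : Nat) : Int) := by omega
    have hsl : PySem.List.slice ((players.take h).map (fun p => max (PySem.Int.floordiv p m) 0)) (some (max 0 ((h : Int) - 0 + 1))) none = [] := by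
      rw [hb, PySem.List.slice_from_natCast, List.drop_eq_nil_of_le (by omega)]
    rw [hsl]
    have htake : players.take (h + 1) = players.take h ++ [players[h]] := by
      rw [List.take_add_one, List.getElem?_eq_getElem hh]
      simp
    rw [htake]
    simp
    rw [List.take_add_one]
    simp [List.getElem?_eq_getElem hh]

-- ---- generic facts about prefix-max vs sum of clipped entries ----

lemma foldl_max_of_nonpos (P : List Int) : ∀ a : Int, 0 ≤ a → (∀ x ∈ P, x ≤ 0) →
    P.foldl max a = a := by
  induction P with
  | nil => intro a _ _; rfl
  | cons x P ih =>
    intro a ha hall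
    have : max a x = a := by
      have := hall x (by simp)
      omega
    simpa [this] using ih a ha (fun y hy => hall y (by simp [hy]))

lemma foldl_max_le_sum (P : List Int) : ∀ a : Int, 0 ≤ a →
    P.foldl max a ≤ a + (P.map (fun x => max x 0)).sum := by
  induction P with
  | nil => intro a _; simp
  | cons x P ih =>
    intro a ha
    have h1 := ih (max a x) (by omega)
    have h2 : max a x ≤ a + max x 0 := by omega
    simp only [List.foldl_cons, List.map_cons, List.sum_cons]
    omega

lemma foldl_max_lt_sum_of_pos (P : List Int) : ∀ a : Int, 0 < a → (∃ x ∈ P, 0 < x) →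
    P.foldl max a < a + (P.map (fun x => max x 0)).sum := by
  induction P with
  | nil => intro a _ hx; simp at hx
  | cons x P ih =>
    intro a ha hx
    simp only [List.foldl_cons, List.map_cons, List.sum_cons]
    by_cases hpx : 0 < x
    · have h1 := foldl_max_le_sum P (max a x) (by omega)
      omega
    · have hax : max a x = a := by omega
      obtain ⟨y, hy, hy0⟩ := hx
      have hyP : y ∈ P := by
        rcases hy with _ | hy
        · omega
        · assumption
      have := ih a ha ⟨y, hyP, hy0⟩
      rw [hax]
      omega

-- with at most one positive entry the prefix maximum IS the sum of the clipped entries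
lemma foldl_max_eq_sum_of_le_one (P : List Int)
    (h : List.countP (fun x => decide (0 < x)) P ≤ 1) :
    P.foldl max 0 = (P.map (fun x => max x 0)).sum := by
  induction P with
  | nil => simp
  | cons x P ih =>
    rw [List.countP_cons] at h
    simp only [List.foldl_cons, List.map_cons, List.sum_cons]
    by_cases hpx : 0 < x
    · have hzero : List.countP (fun x => decide (0 < x)) P = 0 := by
        simp only [hpx, decide_true, if_true] at h; omega
      have hall : ∀ y ∈ P, y ≤ 0 := by
        intro y hy
        have := (List.countP_eq_zero.mp hzero) y hy
        simpa using this
      rw [show max (0 : Int) x = x by omega, foldl_max_of_nonpos P x (by omega) hall]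
      have : (P.map (fun x => max x 0)).sum = 0 := by
        apply List.sum_eq_zero
        intro z hz
        obtain ⟨y, hy, rfl⟩ := List.mem_map.mp hz
        have := hall y hy
        omega
      omega
    · rw [show max (0 : Int) x = 0 by omega]
      have h' : List.countP (fun x => decide (0 < x)) P ≤ 1 := by
        simp only [hpx, decide_false, Bool.false_eq_true, if_false] at h; omega
      rw [ih h']
      omega

-- with two positive entries the prefix maximum is strictly below the sum
lemma foldl_max_lt_sum_of_two (P : List Int)
    (h : 2 ≤ List.countP (fun x => decide (0 < x)) P) :
    P.foldl max 0 < (P.map (fun x => max x 0)).sum := by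
  induction P with
  | nil => simp at h
  | cons x P ih =>
    rw [List.countP_cons] at h
    simp only [List.foldl_cons, List.map_cons, List.sum_cons]
    by_cases hpx : 0 < x
    · have hpos : 0 < List.countP (fun x => decide (0 < x)) P := by
        simp only [hpx, decide_true, if_true] at h; omega
      obtain ⟨y, hy, hy0⟩ := List.countP_pos_iff.mp hpos
      have := foldl_max_lt_sum_of_pos P (max 0 x) (by omega) ⟨y, hy, by simpa using hy0⟩
      omega
    · rw [show max (0 : Int) x = 0 by omega]
      have h' : 2 ≤ List.countP (fun x => decide (0 < x)) P := by
        simp only [hpx, decide_false, Bool.false_eq_true, if_false] at h; omega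
      have := ih h'
      omega

lemma countP_req (players : List Int) (m : Int) :
    List.countP (fun x => decide (0 < x)) (players.map (fun p => PySem.Int.floordiv p m))
      = List.countP (fun p => decide (0 < PySem.Int.floordiv p m)) players := by
  rw [List.countP_map]; rfl

lemma solution_zero (players : List Int) (m : Int) :
    solution players m 0 = ((players.map (fun p => PySem.Int.floordiv p m)).foldl max 0) := by
  obtain ⟨_, _, h3, _⟩ := invA_zero players m players.length (le_refl _)
  unfold solution
  rw [show (List.range players.length).foldl (stepA players m 0) (List.replicate players.length 0, 0, 0) = runA players m 0 players.length from rfl, h3, List.take_of_length_le (le_refl _)]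

lemma solution_alt_zero (players : List Int) (m : Int) :
    solution_alt players m 0
      = ((players.map (fun p => PySem.Int.floordiv p m)).map (fun x => max x 0)).sum := by
  have h := invB_zero players m players.length (le_refl _)
  unfold solution_alt
  have : (PySem.List.enumerate players 0).take players.length = PySem.List.enumerate players 0 := by
    apply List.take_of_length_le
    rw [PySem.List.length_enumerate]
  rw [← this]
  rw [show ((PySem.List.enumerate players 0).take players.length).foldl (stepB m 0) [] = runB players m 0 players.length from rfl, h, List.take_of_length_le (le_refl _), List.map_map]
  rfl

-- ===== VERDICT (by name: the statement is the Claim_ definition above) =====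
theorem solution_spec : Claim_unchanged_solution := by
  intro players m k _ hpre hnd
  rcases hpre with hnil | ⟨hm, hk⟩
  · subst hnil
    simp [solution, solution_alt, PySem.List.enumerate]
  · rcases lt_or_ge k 1 with hk0 | hk1
    · have hkz : k = 0 := by omega
      subst hkz
      rw [solution_zero, solution_alt_zero]
      apply foldl_max_eq_sum_of_le_one
      rw [countP_req]
      unfold D_solution at hnd
      omega
    · exact eq_of_pos players m k hk1

theorem solution_changed : Claim_changed_solution := by
  unfold Claim_changed_solution; decide

theorem solution_tight : Claim_exact_solution := by
  intro players m k _ _ hd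
  obtain ⟨hkz, hcnt⟩ := hd
  subst hkz
  rw [solution_zero, solution_alt_zero]
  apply ne_of_lt
  apply foldl_max_lt_sum_of_two
  rw [countP_req]
  exact hcnt
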